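-- pv_equiv track=rewrite | github.com/ymn4543/AnalysisOfAlgorithms-PYTHON | hw4/partitions.py | greedyEvens
-- ===== SOURCE A (Python) =====
-- def greedyEvens(array):
--     sum = 0                 # total sum
--     odds = 0                # number of odd numbers
--     parts = 0
--     ans = 0
--     s = 0
--     for i in range(0,len(array)):
--         x = array[i]
--         sum += x
--         if x%2!= 0:
--             odds +=1
--         if odds%2 == 0:
--             parts +=1
--             ans = s + 1
--             s= s + ans
--
--     if sum%2 != 0:
--         return 0
--
--     return ans
-- ===== SOURCE B (Python) =====
-- def greedyEvens(array):
--     # Positions of the odd elements; the running odd-count is odd exactly on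
--     # the index blocks [p0, p1), [p2, p3), ...  between consecutive odd elements.
--     odd_pos = [i for i, x in enumerate(array) if x % 2]
--     if len(odd_pos) % 2:
--         return 0  # an odd number of odd elements means the total sum is odd
--     blocked = sum(odd_pos[j + 1] - odd_pos[j] for j in range(0, len(odd_pos), 2))
--     events = len(array) - blocked
--     return 2 ** (events - 1) if events > 0 else 0
-- ===== Notes on version B (the rewrite author's own statement) =====
-- stated objective: faster
-- what changed: Instead of A's single scan with running sum/odd-count/parts and the accumulator recurrence ans = s+1; s += ans, B stages the work: it collects the positions of the odd elements, decides by the parity of their count (= parity of the total sum), derives the event count as len(array) minus the paired gaps (p1-p0)+(p3-p2)+..., and returns the closed form 2**(events-1).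
import Mathlib
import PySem

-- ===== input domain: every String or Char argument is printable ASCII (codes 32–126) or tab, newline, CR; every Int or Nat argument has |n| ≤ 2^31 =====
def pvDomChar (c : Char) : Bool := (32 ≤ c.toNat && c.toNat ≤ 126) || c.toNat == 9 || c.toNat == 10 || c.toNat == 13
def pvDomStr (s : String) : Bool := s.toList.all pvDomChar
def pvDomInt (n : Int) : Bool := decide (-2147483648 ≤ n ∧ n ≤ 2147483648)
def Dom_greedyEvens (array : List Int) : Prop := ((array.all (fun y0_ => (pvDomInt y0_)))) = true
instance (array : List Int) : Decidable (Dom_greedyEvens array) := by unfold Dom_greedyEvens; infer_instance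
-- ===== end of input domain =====

-- B replaces A's per-iteration counters and accumulator recurrence (ans = s+1; s += ans) by a staged computation: collect the positions of the odd elements, derive the event count from the paired gaps between them, and return the closed form 2^(events-1) (measured faster: A updates an ever-growing integer each iteration).


-- ===== PORT A =====
-- loop body of A: state (sum, odds, parts, ans, s)
def greedyEvensStepA (st : Int × Int × Int × Int × Int) (x : Int) : Int × Int × Int × Int × Int :=
  let sum := st.1 + x
  let odds := if PySem.Int.mod x 2 ≠ 0 then st.2.1 + 1 else st.2.1
  if PySem.Int.mod odds 2 = 0 then
    (sum, odds, st.2.2.1 + 1, st.2.2.2.2 + 1, st.2.2.2.2 + (st.2.2.2.2 + 1))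
  else
    (sum, odds, st.2.2.1, st.2.2.2.1, st.2.2.2.2)

def greedyEvens (array : List Int) : Int :=
  let st := (PySem.List.pyRange 0 (PySem.List.len array) 1).foldl
      (fun st i => greedyEvensStepA st (PySem.List.pyGetD array i 0)) (0, 0, 0, 0, 0)
  if PySem.Int.mod st.1 2 ≠ 0 then 0 else st.2.2.2.1

-- ===== PORT B =====
def greedyEvens_alt (array : List Int) : Int :=
  -- odd_pos = [i for i, x in enumerate(array) if x % 2]
  let oddPos : List Int :=
    ((PySem.List.enumerate array).filter (fun ix => decide (PySem.Int.mod ix.2 2 ≠ 0))).map (·.1)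
  -- if len(odd_pos) % 2: return 0
  if PySem.Int.mod (PySem.List.len oddPos) 2 ≠ 0 then 0
  else
    -- blocked = sum(odd_pos[j+1] - odd_pos[j] for j in range(0, len(odd_pos), 2))
    let blocked : Int :=
      ((PySem.List.pyRange 0 (PySem.List.len oddPos) 2).map
        (fun j => PySem.List.pyGetD oddPos (j + 1) 0 - PySem.List.pyGetD oddPos j 0)).sum
    -- events = len(array) - blocked
    let events : Int := PySem.List.len array - blocked
    -- return 2 ** (events - 1) if events > 0 else 0
    if events > 0 then 2 ^ (events - 1).toNat else 0

-- ===== PRECONDITION & SPEC =====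
def Spec_greedyEvens (array : List Int) (out : Int) : Prop := out = greedyEvens_alt array
instance (array : List Int) (out : Int) : Decidable (Spec_greedyEvens array out) := by unfold Spec_greedyEvens; infer_instance

-- ===== CLAIM (what is proved, stated in full; the proofs are below) =====
def Claim_equal_greedyEvens : Prop := ∀ (array : List Int), Dom_greedyEvens array → Spec_greedyEvens array (greedyEvens array)

-- ===== LEMMAS AND PROOFS =====

-- Proof-side reference loop: state (sum, odds, events); A's (parts, ans, s) are a function of events.
def pvStepE (st : Int × Int × Int) (x : Int) : Int × Int × Int :=
  let total := st.1 + x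
  let odds := if PySem.Int.mod x 2 ≠ 0 then st.2.1 + 1 else st.2.1
  if PySem.Int.mod odds 2 = 0 then (total, odds, st.2.2 + 1) else (total, odds, st.2.2)

-- Coupling invariant: after k events, A's s = 2^k - 1 and A's ans = 2^(k-1) (0 before the first event).
theorem greedyEvens_couple (xs : List Int) : ∀ (sum odds parts : Int) (e : ℕ),
    ∃ (e' : ℕ) (S P parts' : Int),
      xs.foldl greedyEvensStepA (sum, odds, parts, (if e = 0 then (0:Int) else 2 ^ (e-1)), (2 ^ e - 1 : Int))
        = (S, P, parts', (if e' = 0 then (0:Int) else 2 ^ (e'-1)), (2 ^ e' - 1 : Int))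
      ∧ xs.foldl pvStepE (sum, odds, (e : Int)) = (S, P, (e' : Int)) := by
  induction xs with
  | nil =>
    intro sum odds parts e
    exact ⟨e, sum, odds, parts, rfl, rfl⟩
  | cons x xs ih =>
    intro sum odds parts e
    by_cases hev : PySem.Int.mod (if PySem.Int.mod x 2 ≠ 0 then odds + 1 else odds) 2 = 0
    · -- event fires: k goes to e+1
      have hA : greedyEvensStepA (sum, odds, parts, (if e = 0 then (0:Int) else 2 ^ (e-1)), (2 ^ e - 1 : Int)) x
          = (sum + x, (if PySem.Int.mod x 2 ≠ 0 then odds + 1 else odds), parts + 1,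
             (if e + 1 = 0 then (0:Int) else 2 ^ (e+1-1)), (2 ^ (e+1) - 1 : Int)) := by
        have hans : (2:Int) ^ e - 1 + 1 = if e + 1 = 0 then (0:Int) else 2 ^ (e + 1 - 1) := by
          simp
        have hs : (2:Int) ^ e - 1 + (2 ^ e - 1 + 1) = 2 ^ (e + 1) - 1 := by rw [pow_succ]; ring
        simp only [greedyEvensStepA, hev, if_true]
        rw [hs, hans]
      have hB : pvStepE (sum, odds, (e : Int)) x
          = (sum + x, (if PySem.Int.mod x 2 ≠ 0 then odds + 1 else odds), ((e + 1 : ℕ) : Int)) := by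
        simp only [pvStepE, hev, if_true]
        push_cast; ring_nf
      simp only [List.foldl_cons, hA, hB]
      exact ih _ _ _ (e + 1)
    · have hA : greedyEvensStepA (sum, odds, parts, (if e = 0 then (0:Int) else 2 ^ (e-1)), (2 ^ e - 1 : Int)) x
          = (sum + x, (if PySem.Int.mod x 2 ≠ 0 then odds + 1 else odds), parts,
             (if e = 0 then (0:Int) else 2 ^ (e-1)), (2 ^ e - 1 : Int)) := by
        simp only [greedyEvensStepA, hev, if_false]
      have hB : pvStepE (sum, odds, (e : Int)) x
          = (sum + x, (if PySem.Int.mod x 2 ≠ 0 then odds + 1 else odds), (e : Int)) := by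
        simp only [pvStepE, hev, if_false]
      simp only [List.foldl_cons, hA, hB]
      exact ih _ _ _ e

-- B-side reference: the odd positions list, starting the enumeration at s.
def pvOddPos (xs : List Int) (s : Int) : List Int :=
  ((PySem.List.enumerate xs s).filter (fun ix => decide (PySem.Int.mod ix.2 2 ≠ 0))).map (·.1)

-- Sum of the gaps (p1-p0) + (p3-p2) + … over consecutive pairs.
def pvPairBlk : List Int → Int
  | a :: a' :: t => (a' - a) + pvPairBlk t
  | _ => 0

theorem pvOddPos_cons (x : Int) (xs : List Int) (s : Int) :
    pvOddPos (x :: xs) s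
      = (if x % 2 = 1 then [s] else []) ++ pvOddPos xs (s + 1) := by
  by_cases h : x % 2 = 1 <;>
    simp [pvOddPos, PySem.List.enumerate_cons, h]

-- The grand invariant: the fold's running sum has the parity of the number of odd
-- positions seen, and (with matching parities) its event counter is the length of the
-- unblocked region, i.e. length minus the paired gaps.
theorem pv_inv (xs : List Int) : ∀ (t o e s : Int),
    ((xs.foldl pvStepE (t, o, e)).1 % 2 = (t + (pvOddPos xs s).length) % 2)
    ∧ (o % 2 = 0 → ((pvOddPos xs s).length : Int) % 2 = 0 →
        (xs.foldl pvStepE (t, o, e)).2.2 = e + xs.length - pvPairBlk (pvOddPos xs s))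
    ∧ (o % 2 = 1 → ((pvOddPos xs s).length : Int) % 2 = 1 →
        ∀ h t', pvOddPos xs s = h :: t' →
          (xs.foldl pvStepE (t, o, e)).2.2 = e + xs.length - ((h - s) + pvPairBlk t')) := by
  induction xs with
  | nil =>
    intro t o e s
    refine ⟨by simp [pvOddPos], by intro _ _; simp [pvOddPos, pvPairBlk], ?_⟩
    intro _ _ h t' hq
    simp [pvOddPos] at hq
  | cons x xs ih =>
    intro t o e s
    have hx : PySem.Int.mod x 2 = x % 2 := PySem.Int.mod_eq_emod_of_pos (by norm_num)
    rcases Int.emod_two_eq x with hxp | hxp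
    · -- x even: position list and odds parity unchanged
      have hq : pvOddPos (x :: xs) s = pvOddPos xs (s + 1) := by
        rw [pvOddPos_cons]; simp [hxp]
      have hmo : PySem.Int.mod (if PySem.Int.mod x 2 ≠ 0 then o + 1 else o) 2 = o % 2 := by
        rw [hx, if_neg (by omega), PySem.Int.mod_eq_emod_of_pos (by norm_num)]
      rcases Int.emod_two_eq o with hop | hop
      · have hstep : pvStepE (t, o, e) x = (t + x, o, e + 1) := by
          simp only [pvStepE, hx, if_neg (show ¬ x % 2 ≠ 0 by omega)]
          rw [if_pos (by rw [PySem.Int.mod_eq_emod_of_pos (by norm_num)]; omega)]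
        obtain ⟨ih1, ih2, ih3⟩ := ih (t + x) o (e + 1) (s + 1)
        rw [List.foldl_cons, hstep, hq]
        refine ⟨by omega, ?_, ?_⟩
        · intro _ hqe
          have := ih2 hop hqe
          simp only [List.length_cons]
          push_cast
          omega
        · intro ho1 _ _ _ _
          omega
      · have hstep : pvStepE (t, o, e) x = (t + x, o, e) := by
          simp only [pvStepE, hx, if_neg (show ¬ x % 2 ≠ 0 by omega)]
          rw [if_neg (by rw [PySem.Int.mod_eq_emod_of_pos (by norm_num)]; omega)]
        obtain ⟨ih1, ih2, ih3⟩ := ih (t + x) o e (s + 1)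
        rw [List.foldl_cons, hstep, hq]
        refine ⟨by omega, by intro h0 _; omega, ?_⟩
        intro _ hqo h t' ht
        have := ih3 hop hqo h t' ht
        simp only [List.length_cons]
        push_cast
        omega
    · -- x odd: s is prepended to the positions, odds parity flips
      have hxne : x % 2 ≠ 0 := by omega
      have hq : pvOddPos (x :: xs) s = s :: pvOddPos xs (s + 1) := by
        rw [pvOddPos_cons]; simp [hxp]
      rcases Int.emod_two_eq o with hop | hop
      · -- count becomes odd: no event
        have hstep : pvStepE (t, o, e) x = (t + x, o + 1, e) := by
          simp only [pvStepE, hx, if_pos hxne]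
          rw [if_neg (by rw [PySem.Int.mod_eq_emod_of_pos (by norm_num)]; omega)]
        obtain ⟨ih1, ih2, ih3⟩ := ih (t + x) (o + 1) e (s + 1)
        rw [List.foldl_cons, hstep, hq]
        refine ⟨by simp only [List.length_cons]; push_cast; omega, ?_, by intro h1 _ _ _ _; omega⟩
        intro _ hqe
        cases hq' : pvOddPos xs (s + 1) with
        | nil => rw [hq'] at hqe; simp at hqe
        | cons h t' =>
          have hqo : ((pvOddPos xs (s + 1)).length : Int) % 2 = 1 := by
            rw [hq'] at hqe ⊢
            simp only [List.length_cons] at hqe ⊢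
            push_cast at hqe ⊢
            omega
          have := ih3 (by omega) hqo h t' hq'
          simp only [List.length_cons, pvPairBlk]
          push_cast
          omega
      · -- count becomes even: event fires
        have hstep : pvStepE (t, o, e) x = (t + x, o + 1, e + 1) := by
          simp only [pvStepE, hx, if_pos hxne]
          rw [if_pos (by rw [PySem.Int.mod_eq_emod_of_pos (by norm_num)]; omega)]
        obtain ⟨ih1, ih2, ih3⟩ := ih (t + x) (o + 1) (e + 1) (s + 1)
        rw [List.foldl_cons, hstep, hq]
        refine ⟨by simp only [List.length_cons]; push_cast; omega, by intro h0 _; omega, ?_⟩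
        intro _ hqo h t' ht
        injection ht with hh1 hh2
        subst hh1
        subst hh2
        have hqe : ((pvOddPos xs (s + 1)).length : Int) % 2 = 0 := by
          simp only [List.length_cons] at hqo
          push_cast at hqo ⊢
          omega
        have := ih2 (by omega) hqe
        simp only [List.length_cons]
        push_cast
        omega

-- pyRange 0 (2u) 2 enumerated as a List.range
theorem pv_range_two (u : ℕ) :
    PySem.List.pyRange 0 ((2*u : ℕ) : Int) 2 = (List.range u).map (fun k => ((2*k : ℕ) : Int)) := by
  rw [PySem.List.pyRange_of_pos _ _ (by norm_num)]
  rcases Nat.eq_zero_or_pos u with h | h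
  · subst h; simp
  · rw [if_pos (by push_cast; omega)]
    have h2 : ((2*(u:Int) - 0 + 2 - 1) / 2).toNat = u := by omega
    push_cast
    rw [h2]
    apply List.map_congr_left
    intro k _; ring

theorem pv_gapsum_aux : ∀ (u : ℕ) (q : List Int), q.length = 2 * u →
    ((List.range u).map (fun k => q.getD (2*k+1) 0 - q.getD (2*k) 0)).sum = pvPairBlk q := by
  intro u
  induction u with
  | zero =>
    intro q hq
    have : q = [] := List.eq_nil_of_length_eq_zero (by omega)
    subst this
    simp [pvPairBlk]
  | succ u ih =>
    intro q hq
    match q, hq with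
    | a :: a' :: t, hq =>
      have ht : t.length = 2 * u := by simp at hq; omega
      rw [List.range_succ_eq_map]
      simp only [List.map_cons, List.sum_cons, List.map_map]
      have hshift : ((List.range u).map
            ((fun k => (a :: a' :: t).getD (2*k+1) 0 - (a :: a' :: t).getD (2*k) 0) ∘ Nat.succ))
          = (List.range u).map (fun k => t.getD (2*k+1) 0 - t.getD (2*k) 0) := by
        apply List.map_congr_left
        intro k _
        have e1 : 2 * Nat.succ k + 1 = (2*k+1) + 1 + 1 := by omega
        have e2 : 2 * Nat.succ k = (2*k) + 1 + 1 := by omega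
        simp only [Function.comp_apply, e2]
        simp
      rw [hshift, ih t ht]
      simp [pvPairBlk]

-- B's gap sum equals pvPairBlk on even-length lists.
theorem pv_gapsum (q : List Int) (h : q.length % 2 = 0) :
    ((PySem.List.pyRange 0 (PySem.List.len q) 2).map
      (fun j => PySem.List.pyGetD q (j + 1) 0 - PySem.List.pyGetD q j 0)).sum = pvPairBlk q := by
  obtain ⟨u, hu⟩ : ∃ u, q.length = 2 * u := ⟨q.length / 2, by omega⟩
  have hlen : PySem.List.len q = ((2 * u : ℕ) : Int) := by simp [hu]
  rw [hlen, pv_range_two, List.map_map]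
  have hfun : ((List.range u).map
        ((fun j => PySem.List.pyGetD q (j + 1) 0 - PySem.List.pyGetD q j 0) ∘ fun k => ((2*k : ℕ) : Int)))
      = (List.range u).map (fun k => q.getD (2*k+1) 0 - q.getD (2*k) 0) := by
    apply List.map_congr_left
    intro k _
    simp only [Function.comp_apply]
    have h1 : (((2*k : ℕ) : Int) + 1) = ((2*k+1 : ℕ) : Int) := by push_cast; ring
    rw [h1, PySem.List.pyGetD_natCast, PySem.List.pyGetD_natCast]
  rw [hfun]
  exact pv_gapsum_aux u q hu

-- ===== VERDICT (by name: the statement is the Claim_ definition above) =====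
theorem greedyEvens_spec : Claim_equal_greedyEvens := by
  unfold Claim_equal_greedyEvens
  intro array _
  unfold Spec_greedyEvens greedyEvens
  rw [PySem.List.foldl_pyRange_zero_pyGetD array 0 greedyEvensStepA (0, 0, 0, 0, 0)]
  obtain ⟨e', S, P, parts', hA, hB⟩ := greedyEvens_couple array 0 0 0 0
  simp only [pow_zero] at hA
  norm_num at hA
  norm_num at hB
  obtain ⟨h1, h2, _⟩ := pv_inv array 0 0 0 0
  rw [hB] at h1 h2
  simp only at h1 h2
  simp only [hA, greedyEvens_alt]
  rw [show ((PySem.List.enumerate array).filter (fun ix => decide (PySem.Int.mod ix.2 2 ≠ 0))).map (·.1)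
        = pvOddPos array 0 from rfl]
  have hmS : PySem.Int.mod S 2 = S % 2 := PySem.Int.mod_eq_emod_of_pos (by norm_num)
  have hmq : PySem.Int.mod (PySem.List.len (pvOddPos array 0)) 2
      = ((pvOddPos array 0).length : Int) % 2 := by
    rw [PySem.List.len_eq]; exact PySem.Int.mod_eq_emod_of_pos (by norm_num)
  rw [hmS, hmq]
  rcases Int.emod_two_eq (((pvOddPos array 0).length : Int)) with hqp | hqp
  · -- even number of odd elements: A's total sum is even, B takes the gap path
    rw [if_neg (show ¬ ((pvOddPos array 0).length : Int) % 2 ≠ 0 by omega),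
        if_neg (show ¬ S % 2 ≠ 0 by omega)]
    have hblk := pv_gapsum (pvOddPos array 0) (by omega)
    rw [hblk]
    have hev : (e' : Int) = (array.length : Int) - pvPairBlk (pvOddPos array 0) := by
      have h22 := h2 (by norm_num) (by omega)
      omega
    rw [PySem.List.len_eq, ← hev]
    cases e' with
    | zero => norm_num
    | succ k =>
      rw [if_neg (show ¬ (k + 1 = 0) by omega),
          if_pos (show ((k + 1 : ℕ) : Int) > 0 by exact_mod_cast Nat.succ_pos k)]
      congr 1
      omega
  · -- odd number of odd elements: both return 0
    rw [if_pos (show ((pvOddPos array 0).length : Int) % 2 ≠ 0 by omega),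
        if_pos (show S % 2 ≠ 0 by omega)]
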